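-- pv_equiv track=rewrite | github.com/anuj527/ANUJ-KUMAR | PPT ASSIGNMENT 16.py | pairwise_destruction
-- ===== SOURCE A (Python) =====
-- def pairwise_destruction(sequence):
--     stack = []
--
--     for word in sequence:
--         if stack and word == stack[-1]:
--             stack.pop()
--         else:
--             stack.append(word)
--
--     return len(stack)
-- ===== SOURCE B (Python) =====
-- def pairwise_destruction(sequence):
--     lst = list(sequence)
--     changed = True
--     while changed:
--         changed = False
--         i = 0
--         while i + 1 < len(lst):
--             if lst[i] == lst[i + 1]:
--                 del lst[i:i + 2]
--                 changed = True
--             else: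
--                 i += 1
--     return len(lst)
-- ===== Notes on version B (the rewrite author's own statement) =====
-- stated objective: alternative
-- what changed: Replaces the single-pass stack with repeated scan-and-delete passes over a list copy: each pass removes every adjacent equal pair it meets, looping until a pass deletes nothing; equivalence holds because adjacent-pair cancellation is confluent.
import Mathlib
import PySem

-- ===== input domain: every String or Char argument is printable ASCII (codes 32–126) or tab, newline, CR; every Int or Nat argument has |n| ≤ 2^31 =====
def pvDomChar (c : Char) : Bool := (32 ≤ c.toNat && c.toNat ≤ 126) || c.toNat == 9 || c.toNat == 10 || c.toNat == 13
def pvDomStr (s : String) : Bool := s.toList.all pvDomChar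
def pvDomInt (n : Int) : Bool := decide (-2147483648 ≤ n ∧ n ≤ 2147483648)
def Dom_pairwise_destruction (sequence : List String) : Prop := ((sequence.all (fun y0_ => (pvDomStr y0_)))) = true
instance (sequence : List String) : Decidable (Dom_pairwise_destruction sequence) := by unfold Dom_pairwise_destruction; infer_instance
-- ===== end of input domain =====

-- B replaces A's single-pass stack by repeated scan-and-delete passes over a list copy
-- (same result; alternative algorithm, not faster).

-- ===== PORT A =====
-- loop body of A: pop the top if it equals word, else append word
def pdStep (stack : List String) (word : String) : List String :=
  if stack ≠ [] ∧ PySem.List.pyGet? stack (-1) = some word then stack.dropLast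
  else stack ++ [word]

def pairwise_destruction (sequence : List String) : Int :=
  ((sequence.foldl pdStep []).length : Int)

-- ===== PORT B =====
-- one inner while-pass of Source B: delete each adjacent equal pair met, flag whether any deletion happened
def pvOnePass : List String → List String × Bool
  | [] => ([], false)
  | [x] => ([x], false)
  | x :: y :: rest =>
    if x = y then ((pvOnePass rest).1, true)
    else
      let p := pvOnePass (y :: rest)
      (x :: p.1, p.2)

-- termination measure for the outer loop (cited by pvReduce's decreasing_by)
theorem pvOnePass_length (l : List String) :
    (pvOnePass l).1.length ≤ l.length ∧
      ((pvOnePass l).2 = true → (pvOnePass l).1.length < l.length) := by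
  induction l using pvOnePass.induct with
  | case1 => simp [pvOnePass]
  | case2 x => simp [pvOnePass]
  | case3 y rest ih =>
    have h1 := ih.1
    rw [show pvOnePass (y :: y :: rest) = ((pvOnePass rest).1, true) from by
      simp [pvOnePass]]
    simp only [List.length_cons]
    exact ⟨by omega, fun _ => by omega⟩
  | case4 x y rest h ih =>
    have h1 := ih.1
    have h2 := ih.2
    simp only [pvOnePass, if_neg h, List.length_cons] at *
    exact ⟨by omega, fun hc => by have := h2 hc; omega⟩

-- outer while-loop of Source B: repeat passes until one deletes nothing
def pvReduce (l : List String) : List String :=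
  let p := pvOnePass l
  if h : p.2 = true then pvReduce p.1 else p.1
termination_by l.length
decreasing_by exact (pvOnePass_length l).2 h

def pairwise_destruction_alt (sequence : List String) : Int :=
  ((pvReduce sequence).length : Int)

-- ===== PRECONDITION & SPEC =====
def Spec_pairwise_destruction (sequence : List String) (out : Int) : Prop := out = pairwise_destruction_alt sequence
instance (sequence : List String) (out : Int) : Decidable (Spec_pairwise_destruction sequence out) := by unfold Spec_pairwise_destruction; infer_instance

-- ===== CLAIM (what is proved, stated in full; the proofs are below) =====
def Claim_equal_pairwise_destruction : Prop := ∀ (sequence : List String), Dom_pairwise_destruction sequence → Spec_pairwise_destruction sequence (pairwise_destruction sequence)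


-- ===== LEMMAS AND PROOFS =====

-- appending to a chain whose last element differs
theorem isChain_append_singleton {s : List String} (hs : s.IsChain (· ≠ ·)) {a : String}
    (h : s.getLast? ≠ some a) : (s ++ [a]).IsChain (· ≠ ·) := by
  rw [List.isChain_append]
  refine ⟨hs, by simp, ?_⟩
  intro x hx y hy
  simp at hy
  subst hy
  intro hxy
  exact h (Option.mem_def.mp (hxy ▸ hx))

-- a chain ending in [a] has getLast? of its init ≠ some a
theorem isChain_last_ne {init : List String} {a : String}
    (hs : (init ++ [a]).IsChain (· ≠ ·)) : init.getLast? ≠ some a := by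
  intro hc
  have := (List.isChain_append.1 hs).2.2 a (by simpa using hc) a (by simp)
  exact this rfl

-- the stack never holds two adjacent equal words
theorem pdStep_chain {s : List String} (hs : s.IsChain (· ≠ ·)) (a : String) :
    (pdStep s a).IsChain (· ≠ ·) := by
  unfold pdStep
  split_ifs with h
  · exact hs.dropLast
  · rcases eq_or_ne s [] with rfl | hne
    · simp
    · refine isChain_append_singleton hs ?_
      intro hc
      exact h ⟨hne, (PySem.List.pyGet?_neg_one (xs := s)).trans hc⟩

theorem pdStep_cancel {s : List String} (hs : s.IsChain (· ≠ ·)) (a : String) :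
    pdStep (pdStep s a) a = s := by
  unfold pdStep
  split_ifs with h h2 h3
  · -- popped, then popped again: impossible since the stack had no adjacent equals
    exfalso
    obtain ⟨hne, hget⟩ := h
    obtain ⟨hne2, hget2⟩ := h2
    rw [PySem.List.pyGet?_neg_one] at hget hget2
    rcases List.eq_nil_or_concat' s with rfl | ⟨init, b, rfl⟩
    · exact hne rfl
    · simp at hget; subst hget
      rw [List.dropLast_concat] at hget2 hne2
      exact isChain_last_ne hs hget2
  · -- popped, then pushed back
    obtain ⟨hne, hget⟩ := h
    rw [PySem.List.pyGet?_neg_one] at hget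
    rcases List.eq_nil_or_concat' s with rfl | ⟨init, b, rfl⟩
    · exact absurd rfl hne
    · simp at hget; subst hget
      rw [List.dropLast_concat]
  · -- pushed, then popped
    simp
  · -- pushed but the pop guard is false: contradiction, the new top is a
    exact absurd ⟨by simp, by rw [PySem.List.pyGet?_neg_one_append_singleton]⟩ h3

-- one pass of B does not change the stack-reduction result
theorem foldl_pdStep_onePass (l : List String) :
    ∀ s : List String, s.IsChain (· ≠ ·) →
      l.foldl pdStep s = (pvOnePass l).1.foldl pdStep s := by
  induction l using pvOnePass.induct with
  | case1 => intro s _; simp [pvOnePass]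
  | case2 x => intro s _; simp [pvOnePass]
  | case3 y rest ih =>
    intro s hs
    rw [show pvOnePass (y :: y :: rest) = ((pvOnePass rest).1, true) from by
      simp [pvOnePass]]
    simp only [List.foldl_cons]
    rw [pdStep_cancel hs]
    exact ih s hs
  | case4 x y rest h ih =>
    intro s hs
    simp only [pvOnePass, if_neg h, List.foldl_cons]
    exact ih (pdStep s x) (pdStep_chain hs x)

-- when a pass deletes nothing, the list is unchanged and has no adjacent equal pair
theorem pvOnePass_done (l : List String) (h : (pvOnePass l).2 = false) :
    (pvOnePass l).1 = l ∧ l.IsChain (· ≠ ·) := by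
  induction l using pvOnePass.induct with
  | case1 => simp [pvOnePass]
  | case2 x => simp [pvOnePass]
  | case3 y rest ih => simp [pvOnePass] at h
  | case4 x y rest hne ih =>
    simp only [pvOnePass, if_neg hne] at h ⊢
    obtain ⟨h1, h2⟩ := ih h
    exact ⟨by rw [h1], List.isChain_cons_cons.2 ⟨hne, h2⟩⟩

-- one unfolding of the outer loop
theorem pvReduce_eq (l : List String) :
    pvReduce l = if _h : (pvOnePass l).2 = true then pvReduce (pvOnePass l).1
                 else (pvOnePass l).1 := by
  rw [pvReduce]

-- reducing does not change the stack-reduction result, and the result is a chain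
theorem pvReduce_main : ∀ (n : Nat) (l : List String), l.length ≤ n →
    (∀ s : List String, s.IsChain (· ≠ ·) →
        l.foldl pdStep s = (pvReduce l).foldl pdStep s) ∧
      (pvReduce l).IsChain (· ≠ ·) := by
  intro n
  induction n with
  | zero =>
    intro l hl
    have : l = [] := List.eq_nil_of_length_eq_zero (Nat.le_zero.1 hl)
    subst this
    simp [pvReduce_eq, pvOnePass]
  | succ n ih =>
    intro l hl
    rw [pvReduce_eq]
    by_cases hflag : (pvOnePass l).2 = true
    · rw [dif_pos hflag]
      have hlt := (pvOnePass_length l).2 hflag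
      have hrec := ih (pvOnePass l).1 (by omega)
      refine ⟨?_, hrec.2⟩
      intro s hs
      rw [foldl_pdStep_onePass l s hs]
      exact hrec.1 s hs
    · rw [dif_neg hflag]
      obtain ⟨h1, h2⟩ := pvOnePass_done l (by simpa using hflag)
      exact ⟨fun s _ => by rw [h1], by rw [h1]; exact h2⟩

-- folding A's step over a list without adjacent equal pairs just appends it
theorem foldl_pdStep_irred (l : List String) :
    ∀ s : List String, (s ++ l).IsChain (· ≠ ·) → l.foldl pdStep s = s ++ l := by
  induction l with
  | nil => intro s _; simp
  | cons x xs ih =>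
    intro s hs
    have hs' : ((s ++ [x]) ++ xs).IsChain (· ≠ ·) := by simpa using hs
    have hsx : (s ++ [x]).IsChain (· ≠ ·) := (List.isChain_append.1 hs').1
    have hstep : pdStep s x = s ++ [x] := by
      unfold pdStep
      rw [if_neg]
      rintro ⟨hne, hget⟩
      rw [PySem.List.pyGet?_neg_one] at hget
      exact isChain_last_ne hsx hget
    rw [List.foldl_cons, hstep, ih (s ++ [x]) hs']
    simp

-- ===== VERDICT (by name: the statement is the Claim_ definition above) =====
theorem pairwise_destruction_spec : Claim_equal_pairwise_destruction := by
  intro sequence _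
  unfold Spec_pairwise_destruction pairwise_destruction pairwise_destruction_alt
  have hm := pvReduce_main sequence.length sequence le_rfl
  have h1 := hm.1 [] (by simp)
  have h2 := foldl_pdStep_irred (pvReduce sequence) []
    (by simpa using hm.2)
  simp only [List.nil_append] at h2
  rw [h1, h2]
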